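-- pv_equiv track=rewrite | github.com/CarolinaMargiotti/Projetos | listas python/Lista 13 Google Python Class.py | x_antes
-- ===== SOURCE A (Python) =====
-- def x_antes(words):
--     palavrasComX = []  # lista para palavras que começam com x
--     palavrasResto = []
--     # percorrer cada palavra para facilitar verificar isoladamente cada
--     for p in words:
--         if p[0] == 'x':  # a palavra começa com x?
--             palavrasComX.append(p)
--         else:  # não começa com x
--             palavrasResto.append(p)
--         palavrasComX.sort()
--         palavrasResto.sort()
--     return palavrasComX+palavrasResto
-- ===== SOURCE B (Python) =====
-- def x_antes(words):
--     ordered = sorted(words)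
--     return [w for w in ordered if w[0] == 'x'] + [w for w in ordered if w[0] != 'x']
-- ===== Notes on version B (the rewrite author's own statement) =====
-- stated objective: faster
-- what changed: A partitions with a loop into two buckets and re-sorts both buckets after every element; B sorts the whole list once and then splits the sorted list with two filter passes.
import Mathlib
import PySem

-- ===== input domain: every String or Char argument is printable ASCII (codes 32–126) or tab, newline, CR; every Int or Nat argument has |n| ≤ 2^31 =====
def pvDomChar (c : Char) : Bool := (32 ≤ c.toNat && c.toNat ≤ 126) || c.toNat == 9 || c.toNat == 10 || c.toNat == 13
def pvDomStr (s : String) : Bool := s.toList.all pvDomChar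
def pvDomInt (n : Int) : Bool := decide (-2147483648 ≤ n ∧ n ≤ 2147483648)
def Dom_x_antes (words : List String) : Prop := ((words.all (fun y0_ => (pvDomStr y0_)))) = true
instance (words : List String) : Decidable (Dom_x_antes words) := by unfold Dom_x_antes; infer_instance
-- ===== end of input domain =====

-- B sorts the whole list once and splits the sorted list with two filters, instead of A's
-- per-element partition loop that re-sorts both buckets after every element.

-- ===== PORT A =====
-- one iteration of A's loop: route p into a bucket, then sort both buckets (as A does every iteration)
def x_antes_step (st : List String × List String) (p : String) : List String × List String :=
  if PySem.Str.pyGet? p 0 == some 'x' then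
    (PySem.List.sorted (st.1 ++ [p]) (fun x => x) false, PySem.List.sorted st.2 (fun x => x) false)
  else
    (PySem.List.sorted st.1 (fun x => x) false, PySem.List.sorted (st.2 ++ [p]) (fun x => x) false)

def x_antes (words : List String) : List String :=
  let st := words.foldl x_antes_step ([], [])
  st.1 ++ st.2

-- ===== PORT B =====
def x_antes_alt (words : List String) : List String :=
  let ordered := PySem.List.sorted words (fun x => x) false
  ordered.filter (fun w => PySem.Str.pyGet? w 0 == some 'x')
    ++ ordered.filter (fun w => !(PySem.Str.pyGet? w 0 == some 'x'))

-- ===== PRECONDITION & SPEC =====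
-- Pre_ excludes lists containing the empty string, on which both Pythons raise IndexError at w[0].
def Pre_x_antes (words : List String) : Prop := ∀ w ∈ words, w.toList ≠ []
instance (words : List String) : Decidable (Pre_x_antes words) := by unfold Pre_x_antes; infer_instance
def pvWitness_x_antes : List String := ["xb", "a", "xa", "b"]

def Spec_x_antes (words : List String) (out : List String) : Prop := out = x_antes_alt words
instance (words : List String) (out : List String) : Decidable (Spec_x_antes words out) := by unfold Spec_x_antes; infer_instance

-- ===== CLAIM (what is proved, stated in full; the proofs are below) =====
def Claim_equal_x_antes : Prop := ∀ (words : List String), Dom_x_antes words → Pre_x_antes words → Spec_x_antes words (x_antes words)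

-- ===== LEMMAS AND PROOFS =====

theorem x_antes_step_pos {x : String} (hx : (PySem.Str.pyGet? x 0 == some 'x') = true) (a b : List String) :
    x_antes_step (PySem.List.sorted a (fun x => x) false, PySem.List.sorted b (fun x => x) false) x
      = (PySem.List.sorted (a ++ [x]) (fun x => x) false, PySem.List.sorted b (fun x => x) false) := by
  unfold x_antes_step
  rw [if_pos hx]
  rw [show PySem.List.sorted (PySem.List.sorted a (fun x => x) false ++ [x]) (fun x => x) false
        = PySem.List.sorted (a ++ [x]) (fun x => x) false from
      PySem.List.sorted_eq_sorted_of_perm _ _ _ (fun _ _ h => h)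
        ((PySem.List.sorted_perm a (fun x => x) false).append_right [x]),
    PySem.List.sorted_sorted]

theorem x_antes_step_neg {x : String} (hx : ¬ (PySem.Str.pyGet? x 0 == some 'x') = true) (a b : List String) :
    x_antes_step (PySem.List.sorted a (fun x => x) false, PySem.List.sorted b (fun x => x) false) x
      = (PySem.List.sorted a (fun x => x) false, PySem.List.sorted (b ++ [x]) (fun x => x) false) := by
  unfold x_antes_step
  rw [if_neg hx]
  rw [show PySem.List.sorted (PySem.List.sorted b (fun x => x) false ++ [x]) (fun x => x) false
        = PySem.List.sorted (b ++ [x]) (fun x => x) false from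
      PySem.List.sorted_eq_sorted_of_perm _ _ _ (fun _ _ h => h)
        ((PySem.List.sorted_perm b (fun x => x) false).append_right [x]),
    PySem.List.sorted_sorted]

-- A's loop, started from a pair of sorted buckets, yields the sorted buckets of the whole input.
theorem x_antes_fold_inv (l : List String) : ∀ (a b : List String),
    l.foldl x_antes_step (PySem.List.sorted a (fun x => x) false, PySem.List.sorted b (fun x => x) false)
    = (PySem.List.sorted (a ++ l.filter (fun w => PySem.Str.pyGet? w 0 == some 'x')) (fun x => x) false,
       PySem.List.sorted (b ++ l.filter (fun w => !(PySem.Str.pyGet? w 0 == some 'x'))) (fun x => x) false) := by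
  induction l with
  | nil => intro a b; simp only [List.foldl_nil, List.filter_nil, List.append_nil]
  | cons x t ih =>
    intro a b
    rw [List.foldl_cons]
    by_cases hx : (PySem.Str.pyGet? x 0 == some 'x') = true
    · rw [x_antes_step_pos hx, ih (a ++ [x]) b]
      have h2 : PySem.List.pyGet? x.toList 0 = some 'x' := by simpa using hx
      simp [h2, List.append_assoc]
    · rw [x_antes_step_neg hx, ih a (b ++ [x])]
      have h2 : ¬ PySem.List.pyGet? x.toList 0 = some 'x' := by simpa using hx
      simp [h2, List.append_assoc]

-- filtering a sorted list = sorting the filtered list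
theorem filter_sorted_comm (xs : List String) (q : String → Bool) :
    (PySem.List.sorted xs (fun x => x) false).filter q
      = PySem.List.sorted (xs.filter q) (fun x => x) false := by
  apply PySem.List.eq_of_perm_of_pairwise_le_of_injective (key := fun x : String => x)
    (fun _ _ h => h)
  · exact ((PySem.List.sorted_perm xs (fun x => x) false).filter q).trans
      (PySem.List.sorted_perm (xs.filter q) (fun x => x) false).symm
  · exact (PySem.List.sorted_pairwise xs (fun x => x)).filter q
  · exact PySem.List.sorted_pairwise (xs.filter q) (fun x => x)

-- ===== VERDICT (by name: the statement is the Claim_ definition above) =====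
theorem x_antes_spec : Claim_equal_x_antes := by
  intro words _ _
  show x_antes words = x_antes_alt words
  unfold x_antes x_antes_alt
  rw [show (([], []) : List String × List String)
      = (PySem.List.sorted [] (fun x : String => x) false, PySem.List.sorted [] (fun x : String => x) false) from rfl,
    x_antes_fold_inv]
  simp only [List.nil_append]
  rw [filter_sorted_comm, filter_sorted_comm]
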